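-- pv_equiv track=rewrite | github.com/tilaboy/work_note | algorithms/str_match/suffix_array.py | power_search
-- ===== SOURCE A (Python) =====
-- def power_search(value):
--     left, right = 0, 2
--     while 2** right < value:
--         left = right
--         right *= 2
--     while left <= right:
--         mid = left + (right - left) // 2
--         score = 2 ** mid
--         if score == value:
--             return mid
--         elif score < value:
--             left = mid + 1
--         else:
--             right = mid - 1
--     return mid if score > value else mid + 1
-- ===== SOURCE B (Python) =====
-- def power_search(value):
--     k = 0
--     while 2 ** k < value:
--         k += 1
--     return k
-- ===== Notes on version B (the rewrite author's own statement) =====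
-- stated objective: simpler
-- what changed: Replaced A's exponential range-doubling plus binary search over the exponent with a single linear scan that increments one counter k until 2**k >= value.
import Mathlib
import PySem

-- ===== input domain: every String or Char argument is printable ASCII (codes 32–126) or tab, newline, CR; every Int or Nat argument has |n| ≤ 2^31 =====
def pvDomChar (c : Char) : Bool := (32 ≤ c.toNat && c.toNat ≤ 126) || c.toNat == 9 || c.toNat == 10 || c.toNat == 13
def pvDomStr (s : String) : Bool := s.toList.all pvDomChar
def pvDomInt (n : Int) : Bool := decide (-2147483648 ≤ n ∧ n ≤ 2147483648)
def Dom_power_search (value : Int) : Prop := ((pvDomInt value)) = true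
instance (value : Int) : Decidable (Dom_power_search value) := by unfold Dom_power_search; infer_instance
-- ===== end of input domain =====

-- B replaces A's exponential doubling + binary search over the exponent with a
-- single linear scan incrementing one counter k until 2**k >= value (simpler).


-- ===== PORT A =====
-- termination helpers for the ports, cited by name in decreasing_by
theorem pv_lt_of_two_pow_lt (k value : Int) (h : (2 : Int) ^ k.toNat < value) : k < value := by
  have h2 : ((k.toNat : Nat) : Int) < ((2 ^ k.toNat : Nat) : Int) := Int.ofNat_lt.mpr Nat.lt_two_pow_self
  have h3 : ((2 ^ k.toNat : Nat) : Int) = (2 : Int) ^ k.toNat := by push_cast; ring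
  exact lt_of_le_of_lt (Int.self_le_toNat k) (lt_trans (h3 ▸ h2) h)

theorem pv_mid_bounds (left right : Int) (h : left ≤ right) :
    left ≤ left + PySem.Int.floordiv (right - left) 2 ∧
    left + PySem.Int.floordiv (right - left) 2 ≤ right := by
  rw [PySem.Int.floordiv_of_nonneg (by norm_num)]
  omega

theorem pv_toNat_lt (x y : Int) (h1 : x < y) (h2 : 0 < y) : x.toNat < y.toNat := by
  omega

-- first while loop: `while 2 ** right < value: left = right; right *= 2`.
-- The `0 < right` guard only makes the loop total in Lean; on every state this
-- loop reaches from the entry (right is positive and doubles) it is true.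
def psLoop1 (value left right : Int) : Int × Int :=
  if h : 0 < right ∧ 2 ^ right.toNat < value then
    psLoop1 value right (right * 2)
  else (left, right)
termination_by (value - right).toNat
decreasing_by exact pv_toNat_lt _ _ (by omega) (by have := pv_lt_of_two_pow_lt right value h.2; omega)

-- second while loop: binary search on [left, right]; `mid`/`score` are the
-- last loop iteration's values, consulted by the final `return`.
def psLoop2 (value left right mid score : Int) : Int :=
  if h : left ≤ right then
    let mid := left + PySem.Int.floordiv (right - left) 2
    let score := (2 : Int) ^ mid.toNat
    if score = value then mid
    else if score < value then psLoop2 value (mid + 1) right mid score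
    else psLoop2 value left (mid - 1) mid score
  else if score > value then mid else mid + 1
termination_by (right + 1 - left).toNat
decreasing_by
  · exact pv_toNat_lt _ _ (by have := pv_mid_bounds left right h; omega) (by omega)
  · exact pv_toNat_lt _ _ (by have := pv_mid_bounds left right h; omega) (by omega)

def power_search (value : Int) : Int :=
  let lr := psLoop1 value 0 2
  psLoop2 value lr.1 lr.2 0 0

-- ===== PORT B =====
-- `k = 0; while 2 ** k < value: k += 1; return k`
def altLoop (value k : Int) : Int :=
  if h : 2 ^ k.toNat < value then altLoop value (k + 1) else k
termination_by (value - k).toNat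
decreasing_by exact pv_toNat_lt _ _ (by omega) (by have := pv_lt_of_two_pow_lt k value h; omega)

def power_search_alt (value : Int) : Int := altLoop value 0

-- ===== PRECONDITION & SPEC =====
def Spec_power_search (value : Int) (out : Int) : Prop := out = power_search_alt value
instance (value : Int) (out : Int) : Decidable (Spec_power_search value out) := by unfold Spec_power_search; infer_instance

-- ===== CLAIM (what is proved, stated in full; the proofs are below) =====
def Claim_equal_power_search : Prop := ∀ (value : Int), Dom_power_search value → Spec_power_search value (power_search value)

-- ===== LEMMAS AND PROOFS =====

-- `r` is the least non-negative exponent with value ≤ 2^r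
def GoodExp (value r : Int) : Prop :=
  0 ≤ r ∧ value ≤ 2 ^ r.toNat ∧ ∀ j : Nat, (j : Int) < r → (2 : Int) ^ j < value

theorem two_pow_int_mono {a b : Nat} (h : a ≤ b) : (2 : Int) ^ a ≤ 2 ^ b :=
  pow_le_pow_right₀ (by norm_num) h

theorem goodExp_unique {value r s : Int} (hr : GoodExp value r) (hs : GoodExp value s) : r = s := by
  obtain ⟨hr0, hr1, hr2⟩ := hr
  obtain ⟨hs0, hs1, hs2⟩ := hs
  by_contra hne
  rcases lt_or_gt_of_ne hne with hlt | hlt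
  · have := hs2 r.toNat (by omega)
    have : (2:Int) ^ r.toNat < 2 ^ r.toNat := lt_of_lt_of_le this hr1
    omega
  · have := hr2 s.toNat (by omega)
    have : (2:Int) ^ s.toNat < 2 ^ s.toNat := lt_of_lt_of_le this hs1
    omega

theorem altLoop_good (value k : Int) (hk : 0 ≤ k)
    (hbelow : ∀ j : Nat, (j : Int) < k → (2 : Int) ^ j < value) :
    GoodExp value (altLoop value k) := by
  fun_induction altLoop value k with
  | case1 k h ih =>
    refine ih (by omega) ?_
    intro j hj
    by_cases hjk : (j : Int) < k
    · exact hbelow j hjk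
    · have : j = k.toNat := by omega
      subst this; exact h
  | case2 k h =>
    exact ⟨hk, by omega, hbelow⟩

theorem psLoop1_good (value left right : Int) (hl : 0 ≤ left) (hr : 2 ≤ right) (hlr : left ≤ right)
    (hbelow : ∀ j : Nat, (j : Int) < left → (2 : Int) ^ j < value) :
    0 ≤ (psLoop1 value left right).1 ∧ (psLoop1 value left right).1 ≤ (psLoop1 value left right).2 ∧
    (∀ j : Nat, (j : Int) < (psLoop1 value left right).1 → (2 : Int) ^ j < value) ∧
    value ≤ 2 ^ (psLoop1 value left right).2.toNat := by
  fun_induction psLoop1 value left right with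
  | case1 left right h ih =>
    refine ih (by omega) (by omega) (by omega) ?_
    intro j hj
    calc (2:Int) ^ j ≤ 2 ^ right.toNat := two_pow_int_mono (by omega)
      _ < value := h.2
  | case2 left right h =>
    refine ⟨hl, hlr, hbelow, ?_⟩
    simp only
    have hnv : ¬ ((2:Int) ^ right.toNat < value) := fun hc => h ⟨by omega, hc⟩
    omega

theorem psLoop2_good (value left right mid score : Int)
    (hl : 0 ≤ left) (hlr : left ≤ right + 1)
    (hbelow : ∀ j : Nat, (j : Int) < left → (2 : Int) ^ j < value)
    (hup : value ≤ 2 ^ (right + 1).toNat)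
    (hexit : ¬ left ≤ right →
      0 ≤ mid ∧ score = 2 ^ mid.toNat ∧
        ((left = mid + 1 ∧ score < value) ∨ (right = mid - 1 ∧ value < score))) :
    GoodExp value (psLoop2 value left right mid score) := by
  fun_induction psLoop2 value left right mid score with
  | case1 left right mid score h m s heq =>
    -- score == value: return mid
    have hm : left ≤ m ∧ m ≤ right := by
      have := PySem.Int.floordiv_of_nonneg (a := right - left) (b := 2) (by norm_num)
      simp only [m]; omega
    refine ⟨by omega, by simp [s] at heq; omega, ?_⟩
    intro j hj
    have : (2:Int) ^ j < 2 ^ m.toNat := by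
      apply pow_lt_pow_right₀ (by norm_num); omega
    simp only [s] at heq; omega
  | case2 left right mid score h m s hne hlt ih =>
    have hm : left ≤ m ∧ m ≤ right := by
      have := PySem.Int.floordiv_of_nonneg (a := right - left) (b := 2) (by norm_num)
      simp only [m]; omega
    refine ih (by omega) (by omega) ?_ hup ?_
    · intro j hj
      by_cases hjl : (j : Int) < left
      · exact hbelow j hjl
      · calc (2:Int) ^ j ≤ 2 ^ m.toNat := two_pow_int_mono (by omega)
          _ < value := by simpa [s] using hlt
    · intro _
      exact ⟨by omega, rfl, Or.inl ⟨rfl, by simpa [s] using hlt⟩⟩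
  | case3 left right mid score h m s hne hge ih =>
    have hm : left ≤ m ∧ m ≤ right := by
      have := PySem.Int.floordiv_of_nonneg (a := right - left) (b := 2) (by norm_num)
      simp only [m]; omega
    have hvs : value < s := by
      simp only [s] at hne hge ⊢
      omega
    refine ih hl (by omega) hbelow ?_ ?_
    · have : (m - 1 + 1).toNat = m.toNat := by omega
      rw [this]
      simp only [s] at hvs; omega
    · intro _
      exact ⟨by omega, rfl, Or.inr ⟨rfl, hvs⟩⟩
  | case4 left right mid score h hgt =>
    -- exit with score > value: result is mid
    obtain ⟨hm0, hsc, hcase⟩ := hexit h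
    rcases hcase with ⟨hleft, hlt⟩ | ⟨hright, hgt'⟩
    · omega
    · refine ⟨hm0, by omega, ?_⟩
      intro j hj
      exact hbelow j (by omega)
  | case5 left right mid score h hngt =>
    -- exit with score ≤ value: result is mid + 1
    obtain ⟨hm0, hsc, hcase⟩ := hexit h
    rcases hcase with ⟨hleft, hlt⟩ | ⟨hright, hgt'⟩
    · refine ⟨by omega, ?_, ?_⟩
      · calc value ≤ 2 ^ (right + 1).toNat := hup
          _ ≤ 2 ^ (mid + 1).toNat := two_pow_int_mono (by omega)
      · intro j hj; exact hbelow j (by omega)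
    · omega

-- ===== VERDICT (by name: the statement is the Claim_ definition above) =====
theorem power_search_spec : Claim_equal_power_search := by
  intro value _
  unfold Spec_power_search power_search power_search_alt
  have h1 := psLoop1_good value 0 2 (by norm_num) (by norm_num) (by norm_num)
    (by intro j hj; omega)
  obtain ⟨ha, hb, hc, hd⟩ := h1
  have hA : GoodExp value (psLoop2 value (psLoop1 value 0 2).1 (psLoop1 value 0 2).2 0 0) := by
    refine psLoop2_good value _ _ 0 0 ha (by omega) hc ?_ ?_
    · calc value ≤ 2 ^ (psLoop1 value 0 2).2.toNat := hd
        _ ≤ 2 ^ ((psLoop1 value 0 2).2 + 1).toNat := two_pow_int_mono (by omega)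
    · intro hcon; exact absurd (by omega : (psLoop1 value 0 2).1 ≤ (psLoop1 value 0 2).2) hcon
  have hB : GoodExp value (altLoop value 0) := altLoop_good value 0 (by norm_num)
    (by intro j hj; omega)
  exact goodExp_unique hA hB
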